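-- pv_equiv track=rewrite | github.com/murugan-k-0204/Competitive-Programming | Geeks For Geeks/Subtraction and two numbers/Subtraction and two numbers.py | repeatedSubtraction
-- ===== SOURCE A (Python) =====
-- def repeatedSubtraction(A, B):
--     count =0
--     while A!=0 and B!=0:
--         if A>B:
--             count += A//B
--             A%=B
--         else:
--             count += B//A
--             B%=A
--     return count
-- ===== SOURCE B (Python) =====
-- def _quotients(A, B):
--     if A == 0 or B == 0:
--         return []
--     hi, lo = (A, B) if A > B else (B, A)
--     return [hi // lo] + _quotients(lo, hi % lo)
--
--
-- def repeatedSubtraction(A, B):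
--     return sum(_quotients(A, B))
-- ===== Notes on version B (the rewrite author's own statement) =====
-- stated objective: alternative
-- what changed: Replaced the asymmetric accumulator while-loop by a recursion that normalizes the pair to (hi, lo), builds the list of continued-fraction quotients, and returns its sum.
import Mathlib
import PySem

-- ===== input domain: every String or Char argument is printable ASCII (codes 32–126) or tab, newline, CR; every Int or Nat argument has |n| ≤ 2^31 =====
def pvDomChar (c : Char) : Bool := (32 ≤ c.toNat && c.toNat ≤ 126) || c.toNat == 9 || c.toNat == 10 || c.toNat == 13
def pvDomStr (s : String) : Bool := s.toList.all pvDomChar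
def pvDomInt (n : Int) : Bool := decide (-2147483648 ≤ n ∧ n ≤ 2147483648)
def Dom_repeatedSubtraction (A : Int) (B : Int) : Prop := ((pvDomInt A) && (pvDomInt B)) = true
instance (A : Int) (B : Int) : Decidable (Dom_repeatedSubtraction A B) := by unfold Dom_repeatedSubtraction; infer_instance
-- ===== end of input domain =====

-- B replaces A's asymmetric accumulator while-loop by a recursion that normalizes the
-- pair to (hi, lo), builds the list of Euclidean quotients, and returns its sum.

-- ===== PORT A =====
-- The while loop, with a fuel guard for totality only; on every Pre_ input the
-- fuel A.natAbs + B.natAbs + 1 exceeds the number of iterations the Python loop makes.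
def pvLoopA (fuel : Nat) (A B count : Int) : Int :=
  match fuel with
  | 0 => count
  | fuel + 1 =>
    if A ≠ 0 ∧ B ≠ 0 then
      if A > B then pvLoopA fuel (PySem.Int.mod A B) B (count + PySem.Int.floordiv A B)
      else pvLoopA fuel A (PySem.Int.mod B A) (count + PySem.Int.floordiv B A)
    else count

def repeatedSubtraction (A : Int) (B : Int) : Int :=
  pvLoopA (A.natAbs + B.natAbs + 1) A B 0

-- ===== PORT B =====
-- Source B's _quotients helper, with the same fuel guard for totality.
def pvQuots (fuel : Nat) (A B : Int) : List Int :=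
  match fuel with
  | 0 => []
  | fuel + 1 =>
    if A = 0 ∨ B = 0 then []
    else
      let p := if A > B then (A, B) else (B, A)
      PySem.Int.floordiv p.1 p.2 :: pvQuots fuel p.2 (PySem.Int.mod p.1 p.2)

def repeatedSubtraction_alt (A : Int) (B : Int) : Int :=
  (pvQuots (A.natAbs + B.natAbs + 1) A B).sum

-- ===== PRECONDITION & SPEC =====
-- Pre_ is exactly the set of inputs on which Python A's while loop terminates: both
-- arguments nonnegative, or one argument zero, or two equal negatives, or mixed signs
-- with the negative one dividing the positive one; everywhere else A loops forever
-- and B's recursion is likewise infinite.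
def Pre_repeatedSubtraction (A : Int) (B : Int) : Prop :=
  (0 ≤ A ∧ 0 ≤ B) ∨ A = 0 ∨ B = 0 ∨ (A < 0 ∧ B < 0 ∧ A = B) ∨
    (0 < A ∧ B < 0 ∧ B ∣ A) ∨ (A < 0 ∧ 0 < B ∧ A ∣ B)
instance (A : Int) (B : Int) : Decidable (Pre_repeatedSubtraction A B) := by
  unfold Pre_repeatedSubtraction; infer_instance

def pvWitness_repeatedSubtraction : Int × Int := (10, 4)

def Spec_repeatedSubtraction (A : Int) (B : Int) (out : Int) : Prop := out = repeatedSubtraction_alt A B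
instance (A : Int) (B : Int) (out : Int) : Decidable (Spec_repeatedSubtraction A B out) := by
  unfold Spec_repeatedSubtraction; infer_instance

-- ===== CLAIM (what is proved, stated in full; the proofs are below) =====
def Claim_equal_repeatedSubtraction : Prop := ∀ (A : Int) (B : Int), Dom_repeatedSubtraction A B → Pre_repeatedSubtraction A B → Spec_repeatedSubtraction A B (repeatedSubtraction A B)

-- ===== LEMMAS AND PROOFS =====

-- pvQuots is symmetric in its two integer arguments (the normalization step
-- picks the same ordered pair either way).
theorem pvQuots_swap (n : Nat) (A B : Int) : pvQuots n A B = pvQuots n B A := by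
  cases n with
  | zero => rfl
  | succ n =>
    simp only [pvQuots]
    by_cases hz : A = 0 ∨ B = 0
    · have hz' : B = 0 ∨ A = 0 := hz.symm
      simp [hz, hz']
    · have hz' : ¬ (B = 0 ∨ A = 0) := fun h => hz h.symm
      rw [if_neg hz, if_neg hz']
      by_cases h1 : A > B
      · have h2 : ¬ B > A := by omega
        simp [h1, h2]
      · by_cases h2 : B > A
        · simp [h1, h2]
        · have hAB : A = B := by omega
          subst hAB
          simp

-- On nonnegative inputs, with fuel exceeding A.natAbs + B.natAbs, the loop with
-- accumulator c computes c plus the sum of the quotient list (at the same fuel).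
theorem pvLoopA_eq_quots_sum (n : Nat) : ∀ (A B c : Int), 0 ≤ A → 0 ≤ B →
    A.natAbs + B.natAbs < n → pvLoopA n A B c = c + (pvQuots n A B).sum := by
  induction n with
  | zero => intro A B c _ _ h; omega
  | succ n ih =>
    intro A B c hA hB hlt
    simp only [pvLoopA, pvQuots]
    by_cases hz : A = 0 ∨ B = 0
    · have : ¬ (A ≠ 0 ∧ B ≠ 0) := by tauto
      simp [hz, this]
    · push Not at hz
      obtain ⟨hA0, hB0⟩ := hz
      have hA1 : 0 < A := lt_of_le_of_ne hA (Ne.symm hA0)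
      have hB1 : 0 < B := lt_of_le_of_ne hB (Ne.symm hB0)
      have hnz : ¬ (A = 0 ∨ B = 0) := by tauto
      simp only [if_pos (And.intro hA0 hB0), if_neg hnz]
      by_cases hgt : A > B
      · have hm : PySem.Int.mod A B = A % B := PySem.Int.mod_eq_emod_of_pos hB1
        have h0 : 0 ≤ A % B := Int.emod_nonneg A (ne_of_gt hB1)
        have h2 : A % B < B := Int.emod_lt_of_pos A hB1
        have hbound : (A % B).natAbs + B.natAbs < n := by omega
        simp only [if_pos hgt, hm, List.sum_cons]
        rw [ih _ _ _ h0 hB hbound, pvQuots_swap n B (A % B)]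
        ring
      · have hm : PySem.Int.mod B A = B % A := PySem.Int.mod_eq_emod_of_pos hA1
        have h0 : 0 ≤ B % A := Int.emod_nonneg B (ne_of_gt hA1)
        have h2 : B % A < A := Int.emod_lt_of_pos B hA1
        have hAB : A ≤ B := le_of_not_gt hgt
        have hbound : A.natAbs + (B % A).natAbs < n := by omega
        simp only [if_neg hgt, hm, List.sum_cons]
        rw [ih _ _ _ hA h0 hbound]
        ring

-- one unfolding step of each program once the pair reaches a zero
theorem pvLoopA_zero_left (n : Nat) (B c : Int) : pvLoopA n 0 B c = c := by
  cases n <;> simp [pvLoopA]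

theorem pvLoopA_zero_right (n : Nat) (A c : Int) : pvLoopA n A 0 c = c := by
  cases n <;> simp [pvLoopA]

theorem pvQuots_zero_left (n : Nat) (B : Int) : pvQuots n 0 B = [] := by
  cases n <;> simp [pvQuots]

theorem pvQuots_zero_right (n : Nat) (A : Int) : pvQuots n A 0 = [] := by
  cases n <;> simp [pvQuots]

-- ===== VERDICT (by name: the statement is the Claim_ definition above) =====
theorem repeatedSubtraction_spec : Claim_equal_repeatedSubtraction := by
  intro A B _ hpre
  unfold Spec_repeatedSubtraction repeatedSubtraction repeatedSubtraction_alt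
  rcases hpre with ⟨hA, hB⟩ | hA | hB | ⟨hA, hB, hEq⟩ | ⟨hA, hB, hDvd⟩ | ⟨hA, hB, hDvd⟩
  · rw [pvLoopA_eq_quots_sum _ A B 0 hA hB (by omega)]
    ring
  · subst hA
    rw [pvLoopA_zero_left, pvQuots_zero_left]
    simp
  · subst hB
    rw [pvLoopA_zero_right, pvQuots_zero_right]
    simp
  · -- equal negatives: one iteration (else branch in A, tie normalization in B)
    subst hEq
    have hm : PySem.Int.mod A A = 0 := (PySem.Int.mod_eq_zero_iff_dvd A A).mpr dvd_rfl
    have hgt : ¬ A > A := lt_irrefl A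
    have hc1 : A ≠ 0 ∧ A ≠ 0 := by omega
    have hc2 : ¬ (A = 0 ∨ A = 0) := by omega
    simp only [pvLoopA, pvQuots, if_pos hc1, if_neg hc2, if_neg hgt, hm,
      pvLoopA_zero_right, pvQuots_zero_right, List.sum_cons, List.sum_nil]
    ring
  · -- 0 < A, B < 0, B ∣ A: one iteration through the A > B branch
    have hm : PySem.Int.mod A B = 0 := (PySem.Int.mod_eq_zero_iff_dvd A B).mpr hDvd
    have hgt : A > B := lt_trans hB hA
    have hc1 : A ≠ 0 ∧ B ≠ 0 := by omega
    have hc2 : ¬ (A = 0 ∨ B = 0) := by omega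
    simp only [pvLoopA, pvQuots, if_pos hc1, if_neg hc2, if_pos hgt, hm,
      pvLoopA_zero_left, pvQuots_zero_right, List.sum_cons, List.sum_nil]
    ring
  · -- A < 0, 0 < B, A ∣ B: one iteration through the else branch
    have hm : PySem.Int.mod B A = 0 := (PySem.Int.mod_eq_zero_iff_dvd B A).mpr hDvd
    have hgt : ¬ A > B := not_lt_of_gt (lt_trans hA hB)
    have hc1 : A ≠ 0 ∧ B ≠ 0 := by omega
    have hc2 : ¬ (A = 0 ∨ B = 0) := by omega
    simp only [pvLoopA, pvQuots, if_pos hc1, if_neg hc2, if_neg hgt, hm,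
      pvLoopA_zero_right, pvQuots_zero_right, List.sum_cons, List.sum_nil]
    ring
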